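-- pv_equiv track=rewrite | github.com/CPADelaney/flask_roleplay | nyx/response_filter.py | _format_response
-- ===== SOURCE A (Python) =====
-- def _format_response(response: str) -> str:
--     """Ensure proper formatting of the response"""
--     # Ensure bold for commands
--     if not response.startswith("**"):
--         response = f"**{response}**"
--
--     # Add italics for user's weakness
--     response = response.replace("you", "_you_")
--
--     # Add emphasis to key words
--     emphasis_words = ["fuck", "slut", "bitch", "whore", "toy"]
--     for word in emphasis_words:
--         response = response.replace(word, f"**{word}**")
--
--     return response
-- ===== SOURCE B (Python) =====
-- def _format_response(response: str) -> str:
--     """Ensure proper formatting of the response"""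
--     if not response.startswith("**"):
--         response = f"**{response}**"
--     response = response.replace("you", "_you_")
--     # one left-to-right scan replaces the loop of five whole-string .replace passes
--     emphasis_words = ["fuck", "slut", "bitch", "whore", "toy"]
--     out = []
--     i = 0
--     n = len(response)
--     while i < n:
--         for word in emphasis_words:
--             if response.startswith(word, i):
--                 out.append(f"**{word}**")
--                 i += len(word)
--                 break
--         else:
--             out.append(response[i])
--             i += 1
--     return "".join(out)
-- ===== Notes on version B (the rewrite author's own statement) =====
-- stated objective: alternative
-- what changed: A loops five whole-string .replace passes (one per emphasis word); B replaces that loop with a single left-to-right scan over the string using a first-match word table, emitting replacements or characters in one pass; the leading bold guard and the italics replace are kept unchanged, and B matches A exactly on every input.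
import Mathlib
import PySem

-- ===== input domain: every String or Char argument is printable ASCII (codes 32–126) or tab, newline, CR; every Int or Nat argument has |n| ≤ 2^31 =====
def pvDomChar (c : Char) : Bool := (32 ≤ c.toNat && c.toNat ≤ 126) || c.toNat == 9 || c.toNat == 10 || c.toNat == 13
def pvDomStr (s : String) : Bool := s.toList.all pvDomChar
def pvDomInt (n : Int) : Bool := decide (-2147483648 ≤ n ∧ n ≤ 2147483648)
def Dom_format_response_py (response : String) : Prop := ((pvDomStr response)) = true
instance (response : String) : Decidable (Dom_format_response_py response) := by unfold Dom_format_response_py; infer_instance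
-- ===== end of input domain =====

-- B replaces A's loop of five sequential whole-string .replace passes by one left-to-right scan
-- with a first-match word table (objective: alternative; exact same results on all inputs).

-- ===== PORT A =====
def format_response_py (response : String) : String :=
  let r0 := if PySem.Str.startswith response "**" = false then "**" ++ response ++ "**" else response
  let r1 := PySem.Str.replace r0 "you" "_you_"
  List.foldl (fun r w => PySem.Str.replace r w ("**" ++ w ++ "**")) r1 ["fuck", "slut", "bitch", "whore", "toy"]

-- ===== PORT B =====
-- the emphasis word → replacement table of Source B, unrolled in the same order
def wordFuck : List Char := ['f', 'u', 'c', 'k']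
def replFuck : List Char := ['*', '*', 'f', 'u', 'c', 'k', '*', '*']
def wordSlut : List Char := ['s', 'l', 'u', 't']
def replSlut : List Char := ['*', '*', 's', 'l', 'u', 't', '*', '*']
def wordBitch : List Char := ['b', 'i', 't', 'c', 'h']
def replBitch : List Char := ['*', '*', 'b', 'i', 't', 'c', 'h', '*', '*']
def wordWhore : List Char := ['w', 'h', 'o', 'r', 'e']
def replWhore : List Char := ['*', '*', 'w', 'h', 'o', 'r', 'e', '*', '*']
def wordToy : List Char := ['t', 'o', 'y']
def replToy : List Char := ['*', '*', 't', 'o', 'y', '*', '*']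

-- Source B's while-loop: try the table words at the current position in order, first match wins,
-- otherwise copy one character; emitted pieces are concatenated (the ''.join)
def scanB : List Char → List Char
  | [] => []
  | c :: t =>
    if wordFuck.isPrefixOf (c :: t) then replFuck ++ scanB (t.drop 3)
    else if wordSlut.isPrefixOf (c :: t) then replSlut ++ scanB (t.drop 3)
    else if wordBitch.isPrefixOf (c :: t) then replBitch ++ scanB (t.drop 4)
    else if wordWhore.isPrefixOf (c :: t) then replWhore ++ scanB (t.drop 4)
    else if wordToy.isPrefixOf (c :: t) then replToy ++ scanB (t.drop 2)
    else c :: scanB t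
  termination_by l => l.length
  decreasing_by all_goals (simp [List.length_drop]; try omega)

def format_response_py_alt (response : String) : String :=
  let r0 := if PySem.Str.startswith response "**" = false then "**" ++ response ++ "**" else response
  let r1 := PySem.Str.replace r0 "you" "_you_"
  String.ofList (scanB r1.toList)

-- ===== PRECONDITION & SPEC =====
def Spec_format_response_py (response : String) (out : String) : Prop := out = format_response_py_alt response
instance (response : String) (out : String) : Decidable (Spec_format_response_py response out) := by unfold Spec_format_response_py; infer_instance

-- ===== CLAIM (what is proved, stated in full; the proofs are below) =====
def Claim_equal_format_response_py : Prop := ∀ (response : String), Dom_format_response_py response → Spec_format_response_py response (format_response_py response)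

-- ===== LEMMAS AND PROOFS =====

-- clean recursive description of Python str.replace with a NONEMPTY pattern
def repC (old new : List Char) : List Char → List Char
  | [] => []
  | c :: t =>
    if old.isPrefixOf (c :: t) then new ++ repC old new (t.drop (old.length - 1))
    else c :: repC old new t
  termination_by l => l.length
  decreasing_by all_goals (simp [List.length_drop]; try omega)

theorem repC_go_spec (old new : List Char) (h : old ≠ []) :
    ∀ fuel l acc, l.length ≤ fuel →
      PySem.Chars.replace.go old new fuel l acc = acc.reverse ++ repC old new l := by
  intro fuel
  induction fuel with
  | zero =>
    intro l acc hl
    have hl' : l = [] := by cases l <;> simp_all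
    subst hl'
    simp [PySem.Chars.replace.go, repC]
  | succ fuel ih =>
    intro l acc hl
    cases l with
    | nil => simp [PySem.Chars.replace.go, repC]
    | cons c t =>
      rw [PySem.Chars.replace.go]
      by_cases hp : old.isPrefixOf (c :: t)
      · simp only [hp, if_pos]
        obtain ⟨a, old', rfl⟩ : ∃ a old', old = a :: old' := by
          cases old with | nil => exact absurd rfl h | cons a o => exact ⟨a, o, rfl⟩
        have hlen : (List.drop (a :: old').length (c :: t)).length ≤ fuel := by
          simp at hl ⊢; omega
        rw [ih _ _ hlen]
        have hdrop : List.drop (a :: old').length (c :: t) = t.drop ((a :: old').length - 1) := by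
          simp
        rw [hdrop]
        rw [show repC (a :: old') new (c :: t)
              = new ++ repC (a :: old') new (t.drop ((a :: old').length - 1)) by
          rw [repC]; simp [hp]]
        simp
      · simp only [hp, Bool.false_eq_true, if_false]
        rw [ih _ _ (by simp at hl ⊢; omega)]
        rw [show repC old new (c :: t) = c :: repC old new t by rw [repC]; simp [hp]]
        simp

theorem replace_eq_repC (l old new : List Char) (h : old ≠ []) :
    PySem.Chars.replace l old new = repC old new l := by
  rw [PySem.Chars.replace]
  simp only [List.isEmpty_iff, h, reduceIte]
  · exact (repC_go_spec old new h l.length l [] le_rfl).trans (by simp)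

theorem repC_cons (old new : List Char) (c : Char) (t : List Char)
    (h : ¬ old.isPrefixOf (c :: t)) : repC old new (c :: t) = c :: repC old new t := by
  rw [repC]; simp [h]

theorem repC_match (old new x : List Char) (h : old ≠ []) :
    repC old new (old ++ x) = new ++ repC old new x := by
  obtain ⟨a, old', rfl⟩ : ∃ a o, old = a :: o := by
    cases old with | nil => exact absurd rfl h | cons a o => exact ⟨a, o, rfl⟩
  rw [repC.eq_def]
  simp [List.isPrefixOf_iff_prefix, List.prefix_append, List.drop_left']

theorem repC_append (old new p x : List Char)
    (h : ∀ i, i < p.length → ¬ old <+: (p.drop i ++ x)) :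
    repC old new (p ++ x) = p ++ repC old new x := by
  induction p with
  | nil => simp
  | cons a p ih =>
    have h0 : ¬ old.isPrefixOf (a :: (p ++ x)) := by
      have := h 0 (by simp)
      simpa [List.isPrefixOf_iff_prefix] using this
    rw [List.cons_append, repC_cons _ _ _ _ h0, ih (fun i hi => by
      have := h (i + 1) (by simp; omega)
      simpa using this), List.cons_append]

theorem repC_pullback (old : List Char) (b : Char) (r' : List Char) :
    ∀ t q, b ∉ q → q <+: repC old (b :: r') t → q <+: t := by
  intro t
  induction t with
  | nil => intro q _ hq; simpa [repC] using hq
  | cons c t ih =>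
    intro q hb hq
    by_cases hp : old.isPrefixOf (c :: t)
    · rw [repC] at hq
      simp only [hp, if_pos] at hq
      cases q with
      | nil => simp
      | cons a q' =>
        rw [List.cons_append, List.cons_prefix_cons] at hq
        exact absurd hq.1.symm (by intro he; exact hb (he ▸ List.mem_cons_self))
    · rw [repC_cons _ _ _ _ hp] at hq
      cases q with
      | nil => simp
      | cons a q' =>
        rw [List.cons_prefix_cons] at hq
        exact List.cons_prefix_cons.mpr
          ⟨hq.1, ih q' (fun hm => hb (List.mem_cons_of_mem _ hm)) hq.2⟩

theorem no_occ_firstchar (a : Char) (w p x : List Char) (ha : a ∉ p) :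
    ∀ i, i < p.length → ¬ (a :: w) <+: (p.drop i ++ x) := by
  intro i hi hpre
  rw [List.drop_eq_getElem_cons hi, List.cons_append, List.cons_prefix_cons] at hpre
  exact ha (hpre.1 ▸ List.getElem_mem hi)

-- A's five sequential .replace passes, as repC chain
def chainC (l : List Char) : List Char :=
  repC wordToy replToy (repC wordWhore replWhore (repC wordBitch replBitch
    (repC wordSlut replSlut (repC wordFuck replFuck l))))

-- one non-matching head character passes unchanged through a replace whose
-- replacement starts with a character not occurring in the word's tail
theorem head_pull (old : List Char) (b : Char) (r' : List Char) (a : Char) (w : List Char)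
    (c : Char) (t : List Char) (hb : b ∉ w) (h : ¬ (a :: w) <+: (c :: t)) :
    ¬ (a :: w) <+: (c :: repC old (b :: r') t) := by
  intro hp
  rw [List.cons_prefix_cons] at hp
  exact h (List.cons_prefix_cons.mpr ⟨hp.1, repC_pullback old b r' t w hb hp.2⟩)

-- the five sequential passes equal B's single first-match scan, on every string
theorem chain_eq_scan : ∀ l : List Char, chainC l = scanB l := by
  suffices H : ∀ n l, l.length ≤ n → chainC l = scanB l from
    fun l => H l.length l le_rfl
  intro n
  induction n with
  | zero =>
    intro l hl
    have : l = [] := by cases l <;> simp_all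
    subst this
    simp [chainC, repC, scanB]
  | succ n ih =>
    intro l hl
    by_cases h2 : wordFuck <+: l
    · obtain ⟨x, rfl⟩ := h2
      have hx := ih x (by simp [wordFuck] at hl ⊢; omega)
      have e0 : chainC (wordFuck ++ x) = replFuck ++ chainC x := by
        unfold chainC
        rw [repC_match wordFuck replFuck _ (by decide)]
        rw [repC_append wordSlut replSlut replFuck _
          (by intro i hi; exact no_occ_firstchar 's' ['l','u','t'] _ _ (by decide) i hi)]
        rw [repC_append wordBitch replBitch replFuck _
          (by intro i hi; exact no_occ_firstchar 'b' ['i','t','c','h'] _ _ (by decide) i hi)]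
        rw [repC_append wordWhore replWhore replFuck _
          (by intro i hi; exact no_occ_firstchar 'w' ['h','o','r','e'] _ _ (by decide) i hi)]
        rw [repC_append wordToy replToy replFuck _
          (by intro i hi; simp only [replFuck, List.length_cons, List.length_nil] at hi; interval_cases i <;>
            simp [replFuck, wordToy, List.cons_prefix_cons])]
      rw [e0, hx]
      simp [scanB, wordFuck, replFuck]
    by_cases h3 : wordSlut <+: l
    · obtain ⟨x, rfl⟩ := h3
      have hx := ih x (by simp [wordSlut] at hl ⊢; omega)
      have e0 : chainC (wordSlut ++ x) = replSlut ++ chainC x := by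
        unfold chainC
        rw [repC_append wordFuck replFuck wordSlut _
          (by intro i hi; exact no_occ_firstchar 'f' ['u','c','k'] _ _ (by decide) i hi)]
        rw [repC_match wordSlut replSlut _ (by decide)]
        rw [repC_append wordBitch replBitch replSlut _
          (by intro i hi; exact no_occ_firstchar 'b' ['i','t','c','h'] _ _ (by decide) i hi)]
        rw [repC_append wordWhore replWhore replSlut _
          (by intro i hi; exact no_occ_firstchar 'w' ['h','o','r','e'] _ _ (by decide) i hi)]
        rw [repC_append wordToy replToy replSlut _
          (by intro i hi; simp only [replSlut, List.length_cons, List.length_nil] at hi; interval_cases i <;>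
            simp [replSlut, wordToy, List.cons_prefix_cons])]
      rw [e0, hx]
      simp [scanB, wordFuck, wordSlut, replSlut]
    by_cases h4 : wordBitch <+: l
    · obtain ⟨x, rfl⟩ := h4
      have hx := ih x (by simp [wordBitch] at hl ⊢; omega)
      have e0 : chainC (wordBitch ++ x) = replBitch ++ chainC x := by
        unfold chainC
        rw [repC_append wordFuck replFuck wordBitch _
          (by intro i hi; exact no_occ_firstchar 'f' ['u','c','k'] _ _ (by decide) i hi)]
        rw [repC_append wordSlut replSlut wordBitch _
          (by intro i hi; exact no_occ_firstchar 's' ['l','u','t'] _ _ (by decide) i hi)]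
        rw [repC_match wordBitch replBitch _ (by decide)]
        rw [repC_append wordWhore replWhore replBitch _
          (by intro i hi; exact no_occ_firstchar 'w' ['h','o','r','e'] _ _ (by decide) i hi)]
        rw [repC_append wordToy replToy replBitch _
          (by intro i hi; simp only [replBitch, List.length_cons, List.length_nil] at hi; interval_cases i <;>
            simp [replBitch, wordToy, List.cons_prefix_cons])]
      rw [e0, hx]
      simp [scanB, wordFuck, wordSlut, wordBitch, replBitch]
    by_cases h5 : wordWhore <+: l
    · obtain ⟨x, rfl⟩ := h5
      have hx := ih x (by simp [wordWhore] at hl ⊢; omega)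
      have e0 : chainC (wordWhore ++ x) = replWhore ++ chainC x := by
        unfold chainC
        rw [repC_append wordFuck replFuck wordWhore _
          (by intro i hi; exact no_occ_firstchar 'f' ['u','c','k'] _ _ (by decide) i hi)]
        rw [repC_append wordSlut replSlut wordWhore _
          (by intro i hi; exact no_occ_firstchar 's' ['l','u','t'] _ _ (by decide) i hi)]
        rw [repC_append wordBitch replBitch wordWhore _
          (by intro i hi; exact no_occ_firstchar 'b' ['i','t','c','h'] _ _ (by decide) i hi)]
        rw [repC_match wordWhore replWhore _ (by decide)]
        rw [repC_append wordToy replToy replWhore _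
          (by intro i hi; exact no_occ_firstchar 't' ['o','y'] _ _ (by decide) i hi)]
      rw [e0, hx]
      simp [scanB, wordFuck, wordSlut, wordBitch, wordWhore, replWhore]
    by_cases h6 : wordToy <+: l
    · obtain ⟨x, rfl⟩ := h6
      have hx := ih x (by simp [wordToy] at hl ⊢; omega)
      have e0 : chainC (wordToy ++ x) = replToy ++ chainC x := by
        unfold chainC
        rw [repC_append wordFuck replFuck wordToy _
          (by intro i hi; exact no_occ_firstchar 'f' ['u','c','k'] _ _ (by decide) i hi)]
        rw [repC_append wordSlut replSlut wordToy _
          (by intro i hi; exact no_occ_firstchar 's' ['l','u','t'] _ _ (by decide) i hi)]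
        rw [repC_append wordBitch replBitch wordToy _
          (by intro i hi; exact no_occ_firstchar 'b' ['i','t','c','h'] _ _ (by decide) i hi)]
        rw [repC_append wordWhore replWhore wordToy _
          (by intro i hi; exact no_occ_firstchar 'w' ['h','o','r','e'] _ _ (by decide) i hi)]
        rw [repC_match wordToy replToy _ (by decide)]
      rw [e0, hx]
      simp [scanB, wordFuck, wordSlut, wordBitch, wordWhore, wordToy, replToy]
    -- no word matches at the head
    cases l with
    | nil => simp [chainC, repC, scanB]
    | cons c t =>
      have ht := ih t (by simp at hl; omega)
      have n2 : ¬ wordFuck.isPrefixOf (c :: t) := by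
        rw [List.isPrefixOf_iff_prefix]; exact h2
      have p3 : ¬ wordSlut <+: (c :: repC wordFuck replFuck t) :=
        head_pull wordFuck '*' ['*','f','u','c','k','*','*'] 's' ['l','u','t'] c t (by decide) h3
      have p4 : ¬ wordBitch <+: (c :: repC wordSlut replSlut (repC wordFuck replFuck t)) :=
        head_pull wordSlut '*' ['*','s','l','u','t','*','*'] 'b' ['i','t','c','h'] c _ (by decide)
          (head_pull wordFuck '*' ['*','f','u','c','k','*','*'] 'b' ['i','t','c','h'] c t (by decide) h4)
      have p5 : ¬ wordWhore <+: (c :: repC wordBitch replBitch (repC wordSlut replSlut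
          (repC wordFuck replFuck t))) :=
        head_pull wordBitch '*' ['*','b','i','t','c','h','*','*'] 'w' ['h','o','r','e'] c _ (by decide)
          (head_pull wordSlut '*' ['*','s','l','u','t','*','*'] 'w' ['h','o','r','e'] c _ (by decide)
            (head_pull wordFuck '*' ['*','f','u','c','k','*','*'] 'w' ['h','o','r','e'] c t (by decide) h5))
      have p6 : ¬ wordToy <+: (c :: repC wordWhore replWhore (repC wordBitch replBitch
          (repC wordSlut replSlut (repC wordFuck replFuck t)))) :=
        head_pull wordWhore '*' ['*','w','h','o','r','e','*','*'] 't' ['o','y'] c _ (by decide)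
          (head_pull wordBitch '*' ['*','b','i','t','c','h','*','*'] 't' ['o','y'] c _ (by decide)
            (head_pull wordSlut '*' ['*','s','l','u','t','*','*'] 't' ['o','y'] c _ (by decide)
              (head_pull wordFuck '*' ['*','f','u','c','k','*','*'] 't' ['o','y'] c t (by decide) h6)))
      have e0 : chainC (c :: t) = c :: chainC t := by
        unfold chainC
        rw [repC_cons _ _ _ _ n2]
        rw [repC_cons _ _ _ _ (by rw [List.isPrefixOf_iff_prefix]; exact p3)]
        rw [repC_cons _ _ _ _ (by rw [List.isPrefixOf_iff_prefix]; exact p4)]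
        rw [repC_cons _ _ _ _ (by rw [List.isPrefixOf_iff_prefix]; exact p5)]
        rw [repC_cons _ _ _ _ (by rw [List.isPrefixOf_iff_prefix]; exact p6)]
      have s0 : scanB (c :: t) = c :: scanB t := by
        rw [scanB]
        simp only [Bool.eq_false_iff.mpr (fun hb => h2 (List.isPrefixOf_iff_prefix.mp hb)),
          Bool.eq_false_iff.mpr (fun hb => h3 (List.isPrefixOf_iff_prefix.mp hb)),
          Bool.eq_false_iff.mpr (fun hb => h4 (List.isPrefixOf_iff_prefix.mp hb)),
          Bool.eq_false_iff.mpr (fun hb => h5 (List.isPrefixOf_iff_prefix.mp hb)),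
          Bool.eq_false_iff.mpr (fun hb => h6 (List.isPrefixOf_iff_prefix.mp hb)),
          Bool.false_eq_true, if_false]
      rw [e0, s0, ht]

-- ===== VERDICT (by name: the statement is the Claim_ definition above) =====
theorem format_response_py_spec : Claim_equal_format_response_py := by
  intro response _hdom
  unfold Spec_format_response_py
  simp only [format_response_py, format_response_py_alt]
  rw [← String.toList_inj]
  simp only [List.foldl, PySem.Str.toList_replace, String.toList_ofList]
  rw [replace_eq_repC _ _ _ (by decide), replace_eq_repC _ _ _ (by decide),
    replace_eq_repC _ _ _ (by decide), replace_eq_repC _ _ _ (by decide),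
    replace_eq_repC _ _ _ (by decide)]
  exact chain_eq_scan _
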